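-- pv_equiv track=rewrite | github.com/crossfix/crossfix-tool-release | rank_issue.py | rank_issue
-- ===== SOURCE A (Python) =====
-- def rank_issue(a_list: list):
--     # open url, open info online, open info offline, close url, close info (rank property)
--     # 0       , 1               , 2                , 3        , 4
--     if not a_list:
--         return []
--     score_list = []
--     for row in a_list:
--         assert len(row) == 5
--         score = 0
--         info = row[4]
--         if "Com-Off" in info:
--             score += 2
--         if "HAVE-FIX" in info:
--             score += 1
--         if "Code-SIM" in info:
--             score += 2
--         score_list.append(score)
--         # TODO add issue_quality to score
--     tmp = list(zip(a_list, score_list))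
--     tmp = sorted(tmp, key=lambda k: k[-1], reverse=True)
--     a_list, score_list = zip(*tmp)
--     return a_list
-- ===== SOURCE B (Python) =====
-- def rank_issue(a_list: list):
--     # one-pass bucket sort on the bounded score 0..5 instead of zip + sorted
--     if not a_list:
--         return []
--     buckets = [[] for _ in range(6)]
--     for row in a_list:
--         assert len(row) == 5
--         info = row[4]
--         score = 0
--         if "Com-Off" in info:
--             score += 2
--         if "HAVE-FIX" in info:
--             score += 1
--         if "Code-SIM" in info:
--             score += 2
--         buckets[score].append(row)
--     result = []
--     for s in range(5, -1, -1):
--         result.extend(buckets[s])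
--     return tuple(result)
-- ===== Notes on version B (the rewrite author's own statement) =====
-- stated objective: faster
-- what changed: Replaces the score-list + zip + stable descending sort + unzip pipeline with a single pass that drops each row into one of six score buckets (scores are bounded 0..5) and concatenates the buckets from 5 down to 0.
import Mathlib
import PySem

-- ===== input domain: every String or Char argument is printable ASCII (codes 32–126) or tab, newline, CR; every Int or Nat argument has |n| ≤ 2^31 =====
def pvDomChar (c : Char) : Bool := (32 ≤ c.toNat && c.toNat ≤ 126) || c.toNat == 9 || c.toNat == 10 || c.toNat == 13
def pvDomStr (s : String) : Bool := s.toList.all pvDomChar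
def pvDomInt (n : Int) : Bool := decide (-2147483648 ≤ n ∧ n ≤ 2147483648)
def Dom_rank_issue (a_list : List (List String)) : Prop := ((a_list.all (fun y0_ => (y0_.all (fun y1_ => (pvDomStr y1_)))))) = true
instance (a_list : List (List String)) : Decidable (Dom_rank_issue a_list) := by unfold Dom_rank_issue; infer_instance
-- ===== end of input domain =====

-- B replaces the score-list + zip + stable reverse sort + unzip pipeline by a single pass into six score buckets (scores are bounded 0..5), concatenated from 5 down to 0 (objective: faster by avoiding the sort; timing not measured by the check).

-- ===== PORT A =====
-- literal transliteration of A: build score_list by a loop, zip, stable sort by the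
-- score descending (PySem.List.sorted … true), then take the first components (zip(*tmp)).
def rank_issue (a_list : List (List String)) : List (List String) :=
  if a_list = [] then []
  else
    let score_list : List Int := a_list.foldl (fun sl row =>
      let score : Int := 0
      let info := PySem.List.pyGetD row 4 ""
      let score := if PySem.Str.isIn "Com-Off" info then score + 2 else score
      let score := if PySem.Str.isIn "HAVE-FIX" info then score + 1 else score
      let score := if PySem.Str.isIn "Code-SIM" info then score + 2 else score
      sl ++ [score]) []
    let tmp := a_list.zip score_list
    let tmp := PySem.List.sorted tmp (fun k => k.2) true
    tmp.map (fun p => p.1)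

-- ===== PORT B =====
-- literal transliteration of Source B: six buckets indexed by the score, one pass appending
-- each row to its bucket, then concatenate the buckets for s in range(5, -1, -1).
def rank_issue_alt (a_list : List (List String)) : List (List String) :=
  if a_list = [] then []
  else
    let buckets : List (List (List String)) := List.replicate 6 []
    let buckets := a_list.foldl (fun bs row =>
      let info := PySem.List.pyGetD row 4 ""
      let score : Int := 0
      let score := if PySem.Str.isIn "Com-Off" info then score + 2 else score
      let score := if PySem.Str.isIn "HAVE-FIX" info then score + 1 else score
      let score := if PySem.Str.isIn "Code-SIM" info then score + 2 else score
      bs.modify score.toNat (fun b => b ++ [row])) buckets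
    (PySem.List.pyRange 5 (-1) (-1)).foldl (fun res s => res ++ PySem.List.pyGetD buckets s []) []

-- ===== PRECONDITION & SPEC =====
-- Pre_ excludes inputs containing a row whose length is not 5: there A's `assert len(row) == 5` raises AssertionError.
def Pre_rank_issue (a_list : List (List String)) : Prop := ∀ row ∈ a_list, row.length = 5
instance (a_list : List (List String)) : Decidable (Pre_rank_issue a_list) := by unfold Pre_rank_issue; infer_instance
def pvWitness_rank_issue : List (List String) :=
  [["u1", "a", "b", "c", "Com-Off HAVE-FIX"], ["u2", "a", "b", "c", ""], ["u3", "a", "b", "c", "Code-SIM"]]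
def Spec_rank_issue (a_list : List (List String)) (out : List (List String)) : Prop := out = rank_issue_alt a_list
instance (a_list : List (List String)) (out : List (List String)) : Decidable (Spec_rank_issue a_list out) := by unfold Spec_rank_issue; infer_instance

-- ===== CLAIM (what is proved, stated in full; the proofs are below) =====
def Claim_equal_rank_issue : Prop := ∀ (a_list : List (List String)), Dom_rank_issue a_list → Pre_rank_issue a_list → Spec_rank_issue a_list (rank_issue a_list)

-- ===== LEMMAS AND PROOFS =====

-- the score both Pythons assign to a row
def pvScore (row : List String) : Int :=
  let info := PySem.List.pyGetD row 4 ""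
  (if PySem.Str.isIn "Com-Off" info then (2:Int) else 0) +
  (if PySem.Str.isIn "HAVE-FIX" info then 1 else 0) +
  (if PySem.Str.isIn "Code-SIM" info then 2 else 0)

theorem pvScore_bounds (row : List String) : 0 ≤ pvScore row ∧ pvScore row ≤ 5 := by
  unfold pvScore; dsimp only; split_ifs <;> norm_num

-- descending concatenation of the score buckets of l: filter (score = n) ++ … ++ filter (score = 0)
def pvBlocks {α : Type} (s : α → Int) : Nat → List α → List α
  | 0, l => l.filter (fun a => s a == 0)
  | n+1, l => l.filter (fun a => s a == ((n:Int)+1)) ++ pvBlocks s n l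

theorem mem_pvBlocks {α : Type} (s : α → Int) (n : Nat) (l : List α) (y : α)
    (h : y ∈ pvBlocks s n l) : s y ≤ n := by
  induction n with
  | zero => simp only [pvBlocks, List.mem_filter, beq_iff_eq] at h; omega
  | succ m ih =>
    simp only [pvBlocks, List.mem_append, List.mem_filter, beq_iff_eq] at h
    rcases h with ⟨_, h⟩ | h
    · push_cast; omega
    · have := ih h; push_cast; omega

theorem pvBlocks_append_high {α : Type} (s : α → Int) (n : Nat) (l : List α) (x : α)
    (h : (n:Int) < s x) : pvBlocks s n (l ++ [x]) = pvBlocks s n l := by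
  induction n with
  | zero =>
    simp only [pvBlocks, List.filter_append, List.filter_cons, List.filter_nil, beq_iff_eq]
    have : ¬ s x = 0 := by omega
    simp [this]
  | succ m ih =>
    have hm : (m:Int) < s x := by push_cast at h ⊢; omega
    have : ¬ s x = (m:Int) + 1 := by push_cast at h; omega
    simp only [pvBlocks, List.filter_append, List.filter_cons, List.filter_nil, beq_iff_eq]
    simp [this, ih hm]

theorem insertBy_append_not_before {α : Type} (bef : α → α → Bool) (x : α) (A B : List α)
    (h : ∀ y ∈ A, bef x y = false) :
    PySem.List.insertBy bef x (A ++ B) = A ++ PySem.List.insertBy bef x B := by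
  induction A with
  | nil => rfl
  | cons a t ih =>
    have ha : bef x a = false := h a (by simp)
    cases B with
    | nil =>
      simp only [List.append_nil] at *
      exact PySem.List.insertBy_of_forall_not_before bef x (a :: t) h
    | cons b u =>
      simp only [List.cons_append, PySem.List.insertBy, ha, Bool.false_eq_true, if_false]
      rw [ih (fun y hy => h y (by simp [hy]))]
      simp only [PySem.List.insertBy]

-- insert x into the bucket concatenation: it lands at the end of its own bucket
theorem insertBy_pvBlocks {α : Type} (s : α → Int) (n : Nat) (l : List α) (x : α)
    (hx0 : 0 ≤ s x) (hxn : s x ≤ n) :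
    PySem.List.insertBy (fun a b => decide (s b < s a)) x (pvBlocks s n l)
      = pvBlocks s n (l ++ [x]) := by
  induction n with
  | zero =>
    have hx : s x = 0 := by omega
    rw [PySem.List.insertBy_of_forall_not_before]
    · simp [pvBlocks, List.filter_append, hx]
    · intro y hy
      simp only [pvBlocks, List.mem_filter, beq_iff_eq] at hy
      simp [hy.2, hx]
  | succ m ih =>
    by_cases htop : s x = (m:Int) + 1
    · -- x belongs to the top bucket: it goes right after that bucket
      have hnotA : ∀ y ∈ l.filter (fun a => s a == ((m:Int)+1)), (fun a b => decide (s b < s a)) x y = false := by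
        intro y hy
        simp only [List.mem_filter, beq_iff_eq] at hy
        simp [hy.2, htop]
      have hhigh : pvBlocks s m (l ++ [x]) = pvBlocks s m l := pvBlocks_append_high s m l x (by omega)
      rw [pvBlocks, insertBy_append_not_before _ _ _ _ hnotA]
      have hfil : (l ++ [x]).filter (fun a => s a == ((m:Int)+1)) = l.filter (fun a => s a == ((m:Int)+1)) ++ [x] := by
        simp [List.filter_append, htop]
      rw [pvBlocks, hfil, hhigh, List.append_assoc]
      congr 1
      cases hB : pvBlocks s m l with
      | nil => simp [PySem.List.insertBy]
      | cons b u =>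
        have hb : s b ≤ (m:Int) := mem_pvBlocks s m l b (by rw [hB]; simp)
        have : decide (s b < s x) = true := by simp; omega
        simp [PySem.List.insertBy, this]
    · -- x belongs to a lower bucket: skip the top bucket and recurse
      have hxm : s x ≤ (m:Int) := by push_cast at hxn; omega
      have hnotA : ∀ y ∈ l.filter (fun a => s a == ((m:Int)+1)), (fun a b => decide (s b < s a)) x y = false := by
        intro y hy
        simp only [List.mem_filter, beq_iff_eq] at hy
        simp [hy.2]; omega
      rw [pvBlocks, insertBy_append_not_before _ _ _ _ hnotA, ih hxm]
      have hfil : (l ++ [x]).filter (fun a => s a == ((m:Int)+1)) = l.filter (fun a => s a == ((m:Int)+1)) := by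
        simp [List.filter_append, htop]
      rw [pvBlocks, hfil]

-- the stable reverse sort by a score bounded in [0, n] IS the bucket concatenation
theorem sorted_rev_eq_pvBlocks {α : Type} (s : α → Int) (n : Nat) (l : List α)
    (h : ∀ x ∈ l, 0 ≤ s x ∧ s x ≤ n) :
    PySem.List.sorted l s true = pvBlocks s n l := by
  rw [PySem.List.sorted_rev_eq_foldl_insertBy]
  induction l using List.reverseRecOn with
  | nil =>
    induction n with
    | zero => simp [pvBlocks]
    | succ m ih => simp [pvBlocks] at *; exact ih
  | append_singleton t x ih =>
    rw [List.foldl_append, List.foldl_cons, List.foldl_nil,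
        ih (fun y hy => h y (by simp [hy]))]
    exact insertBy_pvBlocks s n t x (h x (by simp)).1 (h x (by simp)).2

-- pvBlocks commutes with mapping over a list of pairs (row, score)
theorem pvBlocks_map {α : Type} (s : α → Int) (n : Nat) (l : List α) :
    (pvBlocks (fun p : α × Int => p.2) n (l.map (fun r => (r, s r)))).map (fun p => p.1)
      = pvBlocks s n l := by
  induction n with
  | zero => simp [pvBlocks, List.filter_map, Function.comp_def]
  | succ m ih => simp [pvBlocks, List.filter_map, Function.comp_def, ih]

-- A's score loop builds the map of pvScore
theorem score_list_eq_map (a_list : List (List String)) :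
    a_list.foldl (fun sl row =>
      let score : Int := 0
      let info := PySem.List.pyGetD row 4 ""
      let score := if PySem.Str.isIn "Com-Off" info then score + 2 else score
      let score := if PySem.Str.isIn "HAVE-FIX" info then score + 1 else score
      let score := if PySem.Str.isIn "Code-SIM" info then score + 2 else score
      sl ++ [score]) [] = a_list.map pvScore := by
  rw [PySem.List.foldl_append_singleton_eq_map]
  apply List.map_congr_left
  intro r _
  unfold pvScore
  dsimp only
  split_ifs <;> norm_num

-- B's bucket loop maintains buckets = [filter (score=0), …, filter (score=5)] of the prefix
theorem buckets_inv (a_list : List (List String)) :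
    a_list.foldl (fun bs row =>
      let info := PySem.List.pyGetD row 4 ""
      let score : Int := 0
      let score := if PySem.Str.isIn "Com-Off" info then score + 2 else score
      let score := if PySem.Str.isIn "HAVE-FIX" info then score + 1 else score
      let score := if PySem.Str.isIn "Code-SIM" info then score + 2 else score
      bs.modify score.toNat (fun b => b ++ [row])) (List.replicate 6 [])
    = [a_list.filter (fun r => pvScore r == 0), a_list.filter (fun r => pvScore r == 1),
       a_list.filter (fun r => pvScore r == 2), a_list.filter (fun r => pvScore r == 3),
       a_list.filter (fun r => pvScore r == 4), a_list.filter (fun r => pvScore r == 5)] := by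
  induction a_list using List.reverseRecOn with
  | nil => rfl
  | append_singleton t x ih =>
    rw [List.foldl_append, List.foldl_cons, List.foldl_nil, ih]
    have hb := pvScore_bounds x
    have hsc : (let info := PySem.List.pyGetD x 4 ""
      let score : Int := 0
      let score := if PySem.Str.isIn "Com-Off" info then score + 2 else score
      let score := if PySem.Str.isIn "HAVE-FIX" info then score + 1 else score
      if PySem.Str.isIn "Code-SIM" info then score + 2 else score) = pvScore x := by
      unfold pvScore; dsimp only; split_ifs <;> norm_num
    dsimp only
    rw [hsc]
    have h6 : pvScore x = 0 ∨ pvScore x = 1 ∨ pvScore x = 2 ∨ pvScore x = 3 ∨ pvScore x = 4 ∨ pvScore x = 5 := by omega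
    rcases h6 with h | h | h | h | h | h <;>
      simp [h, List.modify, List.filter_append]

-- ===== VERDICT (by name: the statement is the Claim_ definition above) =====
theorem rank_issue_spec : Claim_equal_rank_issue := by
  intro a_list _ hpre
  unfold Spec_rank_issue rank_issue rank_issue_alt
  by_cases hnil : a_list = []
  · simp [hnil]
  · simp only [if_neg hnil]
    rw [score_list_eq_map, buckets_inv]
    rw [show a_list.zip (a_list.map pvScore) = (a_list.map id).zip (a_list.map pvScore) by simp,
        List.zip_map']
    rw [sorted_rev_eq_pvBlocks (fun p : (List String) × Int => p.2) 5
      (a_list.map (fun a => (id a, pvScore a))) (by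
      intro p hp
      simp only [List.mem_map] at hp
      obtain ⟨r, _, rfl⟩ := hp
      exact pvScore_bounds r)]
    simp only [id_eq]
    rw [pvBlocks_map pvScore 5 a_list]
    have hr : PySem.List.pyRange 5 (-1) (-1) = [5, 4, 3, 2, 1, 0] := by decide
    rw [hr]
    simp only [List.foldl_cons, List.foldl_nil, pvBlocks,
      PySem.List.pyGetD, PySem.List.pyGet?, PySem.List.pyIdx?, Int.toNat]
    norm_num
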